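-- pv_equiv track=rewrite | github.com/do0ori/Dev-Course-Algorithm | 프로그래머스/2/17677. ［1차］ 뉴스 클러스터링/［1차］ 뉴스 클러스터링.py | get_multiset
-- ===== SOURCE A (Python) =====
-- def get_multiset(string):
--     string = string.upper()
--     alphabet = [chr(i) for i in range(65, 91)]
--
--     result = []
--     for i in range(len(string) - 1):
--         element = string[i:i+2]
--         if all([e in alphabet for e in element]):
--             result.append(element)
--
--     return result
-- ===== SOURCE B (Python) =====
-- def get_multiset(string):
--     s = string.upper()
--     # break into maximal runs of consecutive alphabetic characters
--     runs = []
--     cur = ""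
--     for ch in s:
--         if ch.isalpha():
--             cur += ch
--         else:
--             if cur:
--                 runs.append(cur)
--             cur = ""
--     if cur:
--         runs.append(cur)
--     # slide a width-2 window over each run
--     result = []
--     for run in runs:
--         for i in range(len(run) - 1):
--             result.append(run[i:i+2])
--     return result
-- ===== Notes on version B (the rewrite author's own statement) =====
-- stated objective: faster
-- what changed: B uppercases the string, segments it into maximal runs of consecutive alphabetic characters, and slides a width-2 window over each run, instead of A's flat index loop that slices every adjacent pair and tests each of its characters for membership in a 26-element alphabet list.
import Mathlib
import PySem

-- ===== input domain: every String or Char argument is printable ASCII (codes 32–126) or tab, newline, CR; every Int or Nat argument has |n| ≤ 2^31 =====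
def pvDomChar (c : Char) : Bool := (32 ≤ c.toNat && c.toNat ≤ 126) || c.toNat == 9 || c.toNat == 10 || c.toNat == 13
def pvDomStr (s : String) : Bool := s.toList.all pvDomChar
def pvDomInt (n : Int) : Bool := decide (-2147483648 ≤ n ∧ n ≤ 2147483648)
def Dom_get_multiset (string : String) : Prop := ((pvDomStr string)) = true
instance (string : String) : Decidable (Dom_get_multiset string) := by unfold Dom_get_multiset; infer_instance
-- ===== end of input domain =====

-- B replaces A's flat index loop (which slices every adjacent pair and tests each
-- character for membership in a 26-element alphabet list) by segmenting the
-- uppercased string into maximal alphabetic runs and sliding a width-2 window over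
-- each run (objective: faster by a constant factor — no per-character list scan).

-- ===== PORT A =====
def get_multiset (string : String) : List String :=
  let s := PySem.Str.upper string
  -- chr(i) for i in range(65, 91): Char.ofNat is exact on this ASCII range
  let alphabet : List Char := (PySem.List.pyRange 65 91 1).map (fun i => Char.ofNat i.toNat)
  (PySem.List.pyRange 0 (PySem.Str.len s - 1) 1).foldl
    (fun result i =>
      let element := PySem.Str.slice s (some i) (some (i + 2))
      if (element.toList.map (fun e => alphabet.contains e)).all id then
        result ++ [element]
      else result)
    []

-- ===== PORT B =====
-- one step of B's run-building loop: extend the current run on a letter,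
-- otherwise flush the (nonempty) run into the run list
def pvStepB (st : List (List Char) × List Char) (ch : Char) : List (List Char) × List Char :=
  if PySem.Chars.isalpha ch then (st.1, st.2 ++ [ch])
  else if st.2 ≠ [] then (st.1 ++ [st.2], []) else (st.1, [])

def get_multiset_alt (string : String) : List String :=
  let cs := (PySem.Str.upper string).toList
  let st := cs.foldl pvStepB ([], [])
  let runs := if st.2 ≠ [] then st.1 ++ [st.2] else st.1
  runs.foldl
    (fun result run =>
      (PySem.List.pyRange 0 ((run.length : Int) - 1) 1).foldl
        (fun r i => r ++ [String.ofList (PySem.List.slice run (some i) (some (i + 2)))])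
        result)
    []

-- ===== PRECONDITION & SPEC =====
def Spec_get_multiset (string : String) (out : List String) : Prop := out = get_multiset_alt string
instance (string : String) (out : List String) : Decidable (Spec_get_multiset string out) := by unfold Spec_get_multiset; infer_instance

-- ===== CLAIM (what is proved, stated in full; the proofs are below) =====
def Claim_equal_get_multiset : Prop := ∀ (string : String), Dom_get_multiset string → Spec_get_multiset string (get_multiset string)

-- ===== LEMMAS AND PROOFS =====

-- the adjacent pairs of cs whose two characters both satisfy Q, in order
def pvPairsP (Q : Char → Bool) : List Char → List String
  | a :: b :: t => (if Q a && Q b then [String.ofList [a, b]] else []) ++ pvPairsP Q (b :: t)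
  | _ => []

lemma pvPairsP_congr (Q R : Char → Bool) :
    ∀ cs : List Char, (∀ c ∈ cs, Q c = R c) → pvPairsP Q cs = pvPairsP R cs := by
  intro cs
  induction cs with
  | nil => intro _; rfl
  | cons a t ih =>
    intro h
    cases t with
    | nil => rfl
    | cons b t' =>
      have ha := h a (by simp)
      have hb := h b (by simp)
      simp only [pvPairsP, ha, hb, ih (fun c hc => h c (by simp [hc]))]

lemma foldl_range_pairs (Q : Char → Bool) :
    ∀ (cs : List Char) (acc : List String),
      (List.range (cs.length - 1)).foldl
        (fun r k =>
          if (((cs.drop k).take 2).map Q).all id then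
            r ++ [String.ofList ((cs.drop k).take 2)]
          else r) acc
      = acc ++ pvPairsP Q cs := by
  intro cs
  induction cs with
  | nil => intro acc; simp [pvPairsP]
  | cons a t ih =>
    intro acc
    cases t with
    | nil => simp [pvPairsP]
    | cons b t' =>
      have hlen : (a :: b :: t').length - 1 = t'.length + 1 := by simp
      rw [hlen, List.range_succ_eq_map, List.foldl_cons, List.foldl_map]
      have hb :
          (List.range ((b :: t').length - 1)).foldl
            (fun r k =>
              if ((((b :: t').drop k).take 2).map Q).all id then
                r ++ [String.ofList (((b :: t').drop k).take 2)]
              else r)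
            (if (((a :: b :: t').drop 0).take 2).map Q |>.all id then
               acc ++ [String.ofList (((a :: b :: t').drop 0).take 2)] else acc)
          = _ := ih _
      simp only [List.length_cons, Nat.add_sub_cancel] at hb ⊢
      rw [show (fun (r : List String) (k : ℕ) =>
            if ((((a :: b :: t').drop (Nat.succ k)).take 2).map Q).all id then
              r ++ [String.ofList (((a :: b :: t').drop (Nat.succ k)).take 2)]
            else r)
          = (fun (r : List String) (k : ℕ) =>
            if ((((b :: t').drop k).take 2).map Q).all id then
              r ++ [String.ofList (((b :: t').drop k).take 2)]
            else r) from rfl]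
      rw [hb]
      have ht2 : List.take 2 (List.drop 0 (a :: b :: t')) = [a, b] := by simp
      rw [ht2]
      have hcond : ((List.map Q [a, b]).all id) = (Q a && Q b) := by simp
      rw [hcond]
      simp only [pvPairsP]
      split_ifs with hq <;> simp [List.append_assoc]

lemma foldl_range_pairs_all :
    ∀ (run : List Char) (acc : List String),
      (List.range (run.length - 1)).foldl
        (fun r k => r ++ [String.ofList ((run.drop k).take 2)]) acc
      = acc ++ pvPairsP (fun _ => true) run := by
  intro run
  induction run with
  | nil => intro acc; simp [pvPairsP]
  | cons a t ih =>
    intro acc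
    cases t with
    | nil => simp [pvPairsP]
    | cons b t' =>
      have hlen : (a :: b :: t').length - 1 = t'.length + 1 := by simp
      rw [hlen, List.range_succ_eq_map, List.foldl_cons, List.foldl_map]
      have hb := ih (acc ++ [String.ofList (((a :: b :: t').drop 0).take 2)])
      simp only [List.length_cons, Nat.add_sub_cancel] at hb ⊢
      rw [show (fun (r : List String) (k : ℕ) =>
            r ++ [String.ofList (((a :: b :: t').drop (Nat.succ k)).take 2)])
          = (fun (r : List String) (k : ℕ) =>
            r ++ [String.ofList (((b :: t').drop k).take 2)]) from rfl]
      rw [hb]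
      simp [pvPairsP, List.append_assoc]

-- splitting the pair list at a non-letter character
lemma pvPairsP_split (c : Char) (hc : PySem.Chars.isalpha c = false) :
    ∀ (cur rest : List Char),
      pvPairsP PySem.Chars.isalpha (cur ++ c :: rest)
      = pvPairsP PySem.Chars.isalpha cur ++ pvPairsP PySem.Chars.isalpha rest := by
  intro cur
  induction cur with
  | nil =>
    intro rest
    cases rest with
    | nil => simp [pvPairsP]
    | cons d t => simp [pvPairsP, hc]
  | cons x xs ih =>
    intro rest
    cases xs with
    | nil =>
      cases rest with
      | nil => simp [pvPairsP, hc]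
      | cons d t => simp [pvPairsP, hc]
    | cons y ys =>
      have ih' := ih rest
      rw [List.cons_append] at ih'
      simp only [List.cons_append, pvPairsP]
      rw [ih']
      simp [List.append_assoc]

def pvEmitAll (runs : List (List Char)) : List String :=
  runs.flatMap (pvPairsP (fun _ => true))

lemma pvEmitAll_append (r1 r2 : List (List Char)) :
    pvEmitAll (r1 ++ r2) = pvEmitAll r1 ++ pvEmitAll r2 := by
  simp [pvEmitAll]

lemma pvPairsP_all_true (cur : List Char) (h : cur.all PySem.Chars.isalpha = true) :
    pvPairsP (fun _ => true) cur = pvPairsP PySem.Chars.isalpha cur := by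
  apply pvPairsP_congr
  intro c hc
  simp only [List.all_eq_true] at h
  simp [h c hc]

def pvFinish (st : List (List Char) × List Char) : List (List Char) :=
  if st.2 ≠ [] then st.1 ++ [st.2] else st.1

-- the core invariant of B's run-building loop
lemma pvGlue :
    ∀ (cs : List Char) (cur : List Char), cur.all PySem.Chars.isalpha = true →
      ∀ runs0 : List (List Char),
        pvEmitAll (pvFinish (cs.foldl pvStepB (runs0, cur)))
        = pvEmitAll runs0 ++ pvPairsP PySem.Chars.isalpha (cur ++ cs) := by
  intro cs
  induction cs with
  | nil =>
    intro cur hcur runs0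
    by_cases h : cur = []
    · subst h; simp [pvFinish, pvPairsP, pvEmitAll]
    · simp only [List.foldl_nil, List.append_nil, pvFinish]
      rw [if_pos h, pvEmitAll_append]
      simp [pvEmitAll, pvPairsP_all_true cur hcur]
  | cons c cs' ih =>
    intro cur hcur runs0
    rw [List.foldl_cons]
    cases hal : PySem.Chars.isalpha c with
    | true =>
      have hstep : pvStepB (runs0, cur) c = (runs0, cur ++ [c]) := by
        simp [pvStepB, hal]
      have hcur' : (cur ++ [c]).all PySem.Chars.isalpha = true := by
        simp [hcur, hal]
      rw [hstep, ih (cur ++ [c]) hcur' runs0]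
      simp [List.append_assoc]
    | false =>
      by_cases h : cur = []
      · have hstep : pvStepB (runs0, cur) c = (runs0, []) := by
          subst h; simp [pvStepB, hal]
        rw [hstep, ih [] (by simp) runs0]
        subst h
        simp only [List.nil_append]
        rw [show (c :: cs') = ([] : List Char) ++ c :: cs' from rfl,
          pvPairsP_split c hal [] cs']
        simp [pvPairsP]
      · have hstep : pvStepB (runs0, cur) c = (runs0 ++ [cur], []) := by
          simp [pvStepB, hal, h]
        rw [hstep, ih [] (by simp) (runs0 ++ [cur])]
        rw [pvEmitAll_append, pvPairsP_split c hal cur cs']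
        simp [pvEmitAll, pvPairsP_all_true cur hcur, List.append_assoc]

-- the alphabet list of A contains exactly the uppercase letters
lemma pvCharLe (a b : Char) : a ≤ b ↔ a.toNat ≤ b.toNat := by
  rw [Char.le_def, UInt32.le_iff_toNat_le]; rfl

lemma pvToNat_ofNat (n : Nat) (h : n < 0xd800) : (Char.ofNat n).toNat = n := by
  rw [Char.toNat_ofNat, if_pos]
  exact Or.inl (by omega)

-- the alphabet list of A contains exactly the uppercase ASCII letters
lemma pvAlphabet_contains (c : Char) :
    ((PySem.List.pyRange 65 91 1).map (fun i => Char.ofNat i.toNat)).contains c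
    = PySem.Chars.isupper c := by
  rcases Bool.eq_false_or_eq_true (PySem.Chars.isupper c) with h | h
  · rw [h]
    simp only [PySem.Chars.isupper, Bool.and_eq_true, decide_eq_true_eq] at h
    have h1 : ('A').toNat ≤ c.toNat := (pvCharLe _ _).mp h.1
    have h2 : c.toNat ≤ ('Z').toNat := (pvCharLe _ _).mp h.2
    have e1 : ('A').toNat = 65 := rfl
    have e2 : ('Z').toNat = 90 := rfl
    simp only [List.contains_iff_mem, List.mem_map]
    refine ⟨(c.toNat : Int), ?_, ?_⟩
    · rw [PySem.List.mem_pyRange_one]; omega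
    · simp [Char.ofNat_toNat]
  · rw [h, Bool.eq_false_iff]
    intro hmem
    rw [List.contains_iff_mem] at hmem
    rcases List.mem_map.mp hmem with ⟨i, hi, hc⟩
    rw [PySem.List.mem_pyRange_one] at hi
    have hv : i.toNat < 0xd800 := by omega
    have hcn : c.toNat = i.toNat := by rw [← hc, pvToNat_ofNat _ hv]
    simp only [PySem.Chars.isupper, Bool.and_eq_false_iff, decide_eq_false_iff_not,
      not_le] at h
    have hlo : (65 : Int) ≤ i := hi.1
    have hhi : i < (91 : Int) := hi.2
    have e1 : ('A').toNat = 65 := rfl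
    have e2 : ('Z').toNat = 90 := rfl
    rcases h with h | h
    · have hle : 'A' ≤ c := (pvCharLe _ _).mpr (by omega)
      exact absurd hle (not_le.mpr h)
    · have hle : c ≤ 'Z' := (pvCharLe _ _).mpr (by omega)
      exact absurd hle (not_le.mpr h)

lemma pvUpper_not_lower (c : Char) :
    PySem.Chars.islower (PySem.Chars.upperChar c) = false := by
  simp only [PySem.Chars.upperChar]
  by_cases hl : PySem.Chars.islower c = true
  · rw [if_pos hl]
    simp only [PySem.Chars.islower, Bool.and_eq_true, decide_eq_true_eq] at hl
    have e1 : ('a').toNat = 97 := rfl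
    have e2 : ('z').toNat = 122 := rfl
    have h1 : ('a').toNat ≤ c.toNat := (pvCharLe _ _).mp hl.1
    have h2 : c.toNat ≤ ('z').toNat := (pvCharLe _ _).mp hl.2
    have ht : (Char.ofNat (c.toNat - 32)).toNat = c.toNat - 32 :=
      pvToNat_ofNat _ (by omega)
    simp only [PySem.Chars.islower, Bool.and_eq_false_iff]
    left
    rw [decide_eq_false_iff_not]
    intro hle
    have := (pvCharLe _ _).mp hle
    rw [ht, e1] at this
    omega
  · rw [if_neg hl]
    exact Bool.eq_false_iff.mpr hl

-- after upper-casing, membership in A's alphabet agrees with isalpha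
lemma pvPred_agree (c : Char) :
    ((PySem.List.pyRange 65 91 1).map (fun i => Char.ofNat i.toNat)).contains
        (PySem.Chars.upperChar c)
    = PySem.Chars.isalpha (PySem.Chars.upperChar c) := by
  rw [pvAlphabet_contains]
  simp only [PySem.Chars.isalpha]
  rw [pvUpper_not_lower, Bool.or_false]

-- A's loop is the recursive pair extraction with A's membership predicate
lemma pvA_eq (string : String) :
    get_multiset string
    = pvPairsP
        (fun c => ((PySem.List.pyRange 65 91 1).map (fun i => Char.ofNat i.toNat)).contains c)
        (PySem.Str.upper string).toList := by
  simp only [get_multiset, PySem.Str.len_eq]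
  rw [PySem.List.pyRange_one 0 (((PySem.Str.upper string).toList.length : Int) - 1),
    List.foldl_map]
  have hn : ((((PySem.Str.upper string).toList.length : Int) - 1) - 0).toNat
      = (PySem.Str.upper string).toList.length - 1 := by omega
  rw [hn]
  have hbody : (fun (result : List String) (k : Nat) =>
        if ((PySem.Str.slice (PySem.Str.upper string) (some (0 + (k : Int)))
              (some (0 + (k : Int) + 2))).toList.map
            (fun e => ((PySem.List.pyRange 65 91 1).map
              (fun i => Char.ofNat i.toNat)).contains e)).all id = true then
          result ++ [PySem.Str.slice (PySem.Str.upper string) (some (0 + (k : Int)))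
            (some (0 + (k : Int) + 2))]
        else result)
      = (fun (r : List String) (k : Nat) =>
        if ((((PySem.Str.upper string).toList.drop k).take 2).map
            (fun e => ((PySem.List.pyRange 65 91 1).map
              (fun i => Char.ofNat i.toNat)).contains e)).all id = true then
          r ++ [String.ofList (((PySem.Str.upper string).toList.drop k).take 2)]
        else r) := by
    funext r k
    have hsl : (PySem.Str.slice (PySem.Str.upper string) (some (0 + (k : Int)))
        (some (0 + (k : Int) + 2))).toList
        = ((PySem.Str.upper string).toList.drop k).take 2 := by
      rw [PySem.Str.toList_slice, PySem.Chars.slice_eq_listSlice,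
        PySem.List.slice_toNat _ (by omega) (by omega)]
      have e1 : ((0 : Int) + (k : Int)).toNat = k := by omega
      have e2 : ((0 : Int) + (k : Int) + 2).toNat = k + 2 := by omega
      rw [e1, e2]
      norm_num
    have hel : PySem.Str.slice (PySem.Str.upper string) (some (0 + (k : Int)))
        (some (0 + (k : Int) + 2))
        = String.ofList (((PySem.Str.upper string).toList.drop k).take 2) := by
      rw [← hsl, String.ofList_toList]
    rw [hsl, hel]
  rw [hbody, foldl_range_pairs]
  simp

-- B's nested output loop emits the unconditioned pairs of every run, in order
lemma pvB_emit :
    ∀ (runs : List (List Char)) (acc : List String),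
      runs.foldl
        (fun result run =>
          (PySem.List.pyRange 0 ((run.length : Int) - 1) 1).foldl
            (fun r i => r ++ [String.ofList (PySem.List.slice run (some i) (some (i + 2)))])
            result)
        acc
      = acc ++ pvEmitAll runs := by
  intro runs
  induction runs with
  | nil => intro acc; simp [pvEmitAll]
  | cons run rest ih =>
    intro acc
    rw [List.foldl_cons, ih]
    have h1 : (PySem.List.pyRange 0 ((run.length : Int) - 1) 1).foldl
        (fun r i => r ++ [String.ofList (PySem.List.slice run (some i) (some (i + 2)))])
        acc
        = acc ++ pvPairsP (fun _ => true) run := by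
      rw [PySem.List.pyRange_one, List.foldl_map]
      have hn : (((run.length : Int) - 1) - 0).toNat = run.length - 1 := by omega
      rw [hn]
      have hbody : (fun (r : List String) (k : Nat) =>
            r ++ [String.ofList (PySem.List.slice run (some (0 + (k : Int)))
              (some (0 + (k : Int) + 2)))])
          = (fun (r : List String) (k : Nat) =>
            r ++ [String.ofList ((run.drop k).take 2)]) := by
        funext r k
        rw [PySem.List.slice_toNat _ (by omega) (by omega)]
        have e1 : ((0 : Int) + (k : Int)).toNat = k := by omega
        have e2 : ((0 : Int) + (k : Int) + 2).toNat = k + 2 := by omega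
        rw [e1, e2]
        norm_num
      rw [hbody, foldl_range_pairs_all]
    rw [h1]
    simp [pvEmitAll, List.append_assoc]

theorem get_multiset_spec : Claim_equal_get_multiset := by
  intro string _
  unfold Spec_get_multiset
  rw [pvA_eq]
  have hB : get_multiset_alt string
      = pvEmitAll (pvFinish ((PySem.Str.upper string).toList.foldl pvStepB ([], []))) := by
    simp only [get_multiset_alt, pvFinish]
    rw [pvB_emit]
    simp
  rw [hB, pvGlue (PySem.Str.upper string).toList [] (by simp) []]
  simp only [pvEmitAll, List.flatMap_nil, List.nil_append]
  apply pvPairsP_congr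
  intro c hc
  rw [PySem.Str.toList_upper, PySem.Chars.upper] at hc
  rcases List.mem_map.mp hc with ⟨x, _, hx⟩
  rw [← hx]
  exact pvPred_agree x
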